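-- pv_equiv track=rewrite | github.com/eirikhoe/advent-of-code | 2023/17/sol.py | naive_sol
-- ===== SOURCE A (Python) =====
-- def iter(pos, map, length):
--     additional_heat = 0
--     additional_heat += sum([map[pos[0]][pos[1] + (i + 1)] for i in range(length)])
--     additional_heat += sum(
--         [map[pos[0] + (i + 1)][pos[1] + length] for i in range(length)]
--     )
--     new_pos = (pos[0] + length, pos[1] + length)
--     return additional_heat, new_pos
--
-- def naive_sol(map, ultra):
--     assert len(map) == len(map[0])
--     n = len(map)
--     start = (0, 0)
--     end = (len(map) - 1, len(map[0]) - 1)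
--     if not ultra:
--         return sum([map[i][i] + map[i - 1][i] for i in range(1, n)])
--     remainder = (n - 1) % 4
--     heat_loss, pos = iter(start, map, 4 + remainder)
--     while pos != end:
--         additional_heat_loss, pos = iter(pos, map, 4)
--         heat_loss += additional_heat_loss
--     return heat_loss
-- ===== SOURCE B (Python) =====
-- def naive_sol(map, ultra):
--     # Closed-form index formulas instead of walking: each column c in 1..n-1 is
--     # entered rightwards at row lo(c) (the staircase block start below c), and
--     # each row r in 1..n-1 is entered downwards at column hi(r) (the block end
--     # at or above r); sum the two lookups directly, with no position state.
--     assert len(map) == len(map[0])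
--     n = len(map)
--     if ultra:
--         L0 = 4 + (n - 1) % 4
--         lo = lambda c: 0 if c <= L0 else L0 + 4 * ((c - 1 - L0) // 4)
--         hi = lambda r: L0 if r <= L0 else L0 + 4 * ((r - L0 + 3) // 4)
--     else:
--         lo = lambda c: c - 1
--         hi = lambda r: r
--     return sum(map[lo(c)][c] for c in range(1, n)) + sum(map[r][hi(r)] for r in range(1, n))
-- ===== Notes on version B (the rewrite author's own statement) =====
-- stated objective: alternative
-- what changed: A simulates the staircase walk block by block with a mutable position and a while loop (iter summing each block's right/down segments); B eliminates the walk entirely and sums two closed-form lookups: for each column c the row lo(c) where the path crosses it rightwards and for each row r the column hi(r) where the path crosses it downwards, both given by direct mod/div arithmetic on the block boundaries.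
-- outside the precondition, e.g. on naive_sol([[1, 2], [3, 4, 5]], False): A returns 6, B returns 6
import Mathlib
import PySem

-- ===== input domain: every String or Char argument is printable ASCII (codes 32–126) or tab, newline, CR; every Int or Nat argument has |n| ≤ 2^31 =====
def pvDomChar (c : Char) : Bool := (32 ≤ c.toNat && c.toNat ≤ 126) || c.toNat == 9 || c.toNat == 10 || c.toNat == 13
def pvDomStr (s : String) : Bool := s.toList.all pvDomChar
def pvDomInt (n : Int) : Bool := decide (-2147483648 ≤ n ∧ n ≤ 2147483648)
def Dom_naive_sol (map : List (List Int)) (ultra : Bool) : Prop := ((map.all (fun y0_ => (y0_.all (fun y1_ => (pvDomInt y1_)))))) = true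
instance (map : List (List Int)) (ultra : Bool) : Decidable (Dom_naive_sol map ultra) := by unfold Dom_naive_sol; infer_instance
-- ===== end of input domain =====

-- B replaces A's block-by-block walk (mutable position + while loop) by two closed-form
-- crossing-index formulas summed directly (objective: alternative decomposition, same cost).

-- ===== PORT A =====
-- map[r][c] (default 0 only outside Pre_, where Python raises)
def pvCell (map : List (List Int)) (r c : Int) : Int :=
  (PySem.List.pyGet? ((PySem.List.pyGet? map r).getD []) c).getD 0

def iterA (pos : Int × Int) (map : List (List Int)) (length : Int) : Int × (Int × Int) :=
  let h1 := ((PySem.List.pyRange 0 length 1).map (fun i => pvCell map pos.1 (pos.2 + (i + 1)))).sum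
  let h2 := ((PySem.List.pyRange 0 length 1).map (fun i => pvCell map (pos.1 + (i + 1)) (pos.2 + length))).sum
  (h1 + h2, (pos.1 + length, pos.2 + length))

-- the 'while pos != end' loop of A (fuel ≥ number of remaining blocks under Pre_)
def loopA (map : List (List Int)) (endp : Int × Int) : Nat → Int × (Int × Int) → Int
  | 0, st => st.1
  | fuel + 1, (heat, pos) =>
    if pos = endp then heat
    else
      let r := iterA pos map 4
      loopA map endp fuel (heat + r.1, r.2)

def naive_sol (map : List (List Int)) (ultra : Bool) : Int :=
  let n : Int := map.length
  if ultra = false then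
    ((PySem.List.pyRange 1 n 1).map (fun i => pvCell map i i + pvCell map (i - 1) i)).sum
  else
    let remainder := PySem.Int.mod (n - 1) 4
    let r := iterA (0, 0) map (4 + remainder)
    loopA map (n - 1, n - 1) map.length (r.1, r.2)

-- ===== PORT B =====
-- lo(c): the row at which the staircase path crosses column c rightwards
def loU (L0 c : Int) : Int := if c ≤ L0 then 0 else L0 + 4 * PySem.Int.floordiv (c - 1 - L0) 4
-- hi(r): the column at which the staircase path crosses row r downwards
def hiU (L0 r : Int) : Int := if r ≤ L0 then L0 else L0 + 4 * PySem.Int.floordiv (r - L0 + 3) 4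

def naive_sol_alt (map : List (List Int)) (ultra : Bool) : Int :=
  let n : Int := map.length
  let L0 : Int := 4 + PySem.Int.mod (n - 1) 4
  let lo : Int → Int := if ultra then loU L0 else fun c => c - 1
  let hi : Int → Int := if ultra then hiU L0 else fun r => r
  ((PySem.List.pyRange 1 n 1).map (fun c => pvCell map (lo c) c)).sum
    + ((PySem.List.pyRange 1 n 1).map (fun r => pvCell map r (hi r))).sum

-- ===== PRECONDITION & SPEC =====
-- Pre_ excludes inputs on which A raises (empty map, non-square maps via the assert or an
-- out-of-range path access, ultra with n < 5); it also excludes ragged maps whose rows are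
-- merely long enough for every access, on which A still returns — the square shape is the
-- function's stated domain (see cites).
def Pre_naive_sol (map : List (List Int)) (ultra : Bool) : Prop :=
  map ≠ [] ∧ (∀ row ∈ map, row.length = map.length) ∧ (ultra = true → 5 ≤ map.length)
instance (map : List (List Int)) (ultra : Bool) : Decidable (Pre_naive_sol map ultra) := by
  unfold Pre_naive_sol; infer_instance

def pvWitness_naive_sol : List (List Int) × Bool := ([[3]], false)

def Spec_naive_sol (map : List (List Int)) (ultra : Bool) (out : Int) : Prop := out = naive_sol_alt map ultra
instance (map : List (List Int)) (ultra : Bool) (out : Int) : Decidable (Spec_naive_sol map ultra out) := by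
  unfold Spec_naive_sol; infer_instance

-- ===== CLAIM =====
def Claim_equal_naive_sol : Prop := ∀ (map : List (List Int)) (ultra : Bool), Dom_naive_sol map ultra → Pre_naive_sol map ultra → Spec_naive_sol map ultra (naive_sol map ultra)

-- ===== LEMMAS AND PROOFS =====

-- one block of the walk, from diagonal position (p,p) with step length L, equals the
-- closed-form crossing sums over the half-open diagonal interval (p, p+L]
theorem block_sum (m : List (List Int)) (lo hi : Int → Int) (p L : Int)
    (hlo : ∀ c, p < c → c ≤ p + L → lo c = p) (hhi : ∀ r, p < r → r ≤ p + L → hi r = p + L) :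
    (iterA (p, p) m L).1 =
      ((PySem.List.pyRange (p + 1) (p + L + 1) 1).map (fun c => pvCell m (lo c) c)).sum
      + ((PySem.List.pyRange (p + 1) (p + L + 1) 1).map (fun r => pvCell m r (hi r))).sum := by
  simp only [iterA, PySem.List.pyRange_one, List.map_map]
  have he : (p + L + 1 - (p + 1)) = L := by ring
  rw [he]
  have hto : (L - 0) = L := by ring
  rw [hto]
  refine congrArg₂ (· + ·) ?_ ?_
  · refine congrArg List.sum (List.map_congr_left (fun j hj => ?_))
    have hjL : (j : Int) < L := by
      have := List.mem_range.mp hj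
      omega
    simp only [Function.comp]
    rw [hlo (p + 1 + j) (by omega) (by omega)]
    congr 1
    ring
  · refine congrArg List.sum (List.map_congr_left (fun j hj => ?_))
    have hjL : (j : Int) < L := by
      have := List.mem_range.mp hj
      omega
    simp only [Function.comp]
    rw [hhi (p + 1 + j) (by omega) (by omega)]
    congr 1
    ring

-- A's while loop from a boundary diagonal L0+4j, with k blocks to go, equals the
-- closed-form crossing sums over the remaining interval
theorem loop_sum (m : List (List Int)) (L0 N : Int) :
    ∀ (k fuel : Nat), k ≤ fuel → ∀ (heat j : Int), 0 ≤ j → N = L0 + 4 * j + 4 * k →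
    loopA m (N, N) fuel (heat, (L0 + 4 * j, L0 + 4 * j)) =
      heat + ((PySem.List.pyRange (L0 + 4 * j + 1) (N + 1) 1).map (fun c => pvCell m (loU L0 c) c)).sum
           + ((PySem.List.pyRange (L0 + 4 * j + 1) (N + 1) 1).map (fun r => pvCell m r (hiU L0 r))).sum := by
  intro k
  induction k with
  | zero =>
    intro fuel _ heat j hj hN
    have hNe : N = L0 + 4 * j := by omega
    have hnil : PySem.List.pyRange (L0 + 4 * j + 1) (N + 1) 1 = [] :=
      PySem.List.pyRange_one_eq_nil (by omega)
    rw [hnil]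
    cases fuel with
    | zero => simp [loopA]
    | succ f => simp [loopA, hNe]
  | succ k ih =>
    intro fuel hf heat j hj hN
    cases fuel with
    | zero => omega
    | succ f =>
      rw [loopA]
      have hne : ((L0 + 4 * j, L0 + 4 * j) : Int × Int) ≠ (N, N) := by
        intro h
        rw [Prod.mk.injEq] at h
        push_cast at hN
        omega
      simp only [hne, if_false]
      have hb := block_sum m (loU L0) (hiU L0) (L0 + 4 * j) 4
        (fun c hc1 hc2 => by
          unfold loU
          rw [if_neg (by omega)]
          have hd : PySem.Int.floordiv (c - 1 - L0) 4 = j :=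
            (PySem.Int.floordiv_eq_iff_of_pos (by norm_num)).mpr ⟨by omega, by omega⟩
          omega)
        (fun r hr1 hr2 => by
          unfold hiU
          rw [if_neg (by omega)]
          have hd : PySem.Int.floordiv (r - L0 + 3) 4 = j + 1 :=
            (PySem.Int.floordiv_eq_iff_of_pos (by norm_num)).mpr ⟨by omega, by omega⟩
          omega)
      have hpos : (iterA (L0 + 4 * j, L0 + 4 * j) m 4).2 = (L0 + 4 * (j + 1), L0 + 4 * (j + 1)) := by
        simp only [iterA]
        refine congrArg₂ Prod.mk (by ring) (by ring)
      simp only [hpos]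
      rw [ih f (by omega) _ (j + 1) (by omega) (by push_cast at hN ⊢; omega)]
      rw [hb]
      have hsplit := PySem.List.pyRange_one_append (L0 + 4 * j + 1) (L0 + 4 * (j + 1) + 1) (N + 1)
        (by omega) (by push_cast at hN; omega)
      rw [hsplit, List.map_append, List.sum_append, List.map_append, List.sum_append]
      have harg : L0 + 4 * j + 4 + 1 = L0 + 4 * (j + 1) + 1 := by ring
      rw [harg]
      ring

-- ===== VERDICT =====
theorem naive_sol_spec : Claim_equal_naive_sol := by
  intro m ultra _ hpre
  unfold Spec_naive_sol
  obtain ⟨hne, _hsq, hu⟩ := hpre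
  have hn1 : 1 ≤ m.length := by cases m with | nil => exact absurd rfl hne | cons a l => simp
  cases ultra with
  | false =>
    unfold naive_sol naive_sol_alt
    simp only [reduceIte, Bool.false_eq_true, if_false]
    rw [PySem.List.sum_map_add_int]
    rw [add_comm]
  | true =>
    have h5 : 5 ≤ m.length := hu rfl
    set n : Int := (m.length : Int) with hn
    have hmod0 : PySem.Int.mod (n - 1) 4 = (n - 1) % 4 :=
      PySem.Int.mod_eq_emod_of_pos (by norm_num)
    set L0 : Int := 4 + PySem.Int.mod (n - 1) 4 with hL0def
    have hL04 : 4 ≤ L0 ∧ L0 ≤ 7 := by rw [hL0def, hmod0]; omega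
    have hL0n : L0 ≤ n - 1 := by rw [hL0def, hmod0]; omega
    obtain ⟨k, hk⟩ : ∃ k : Nat, (n - 1 : Int) = L0 + 4 * 0 + 4 * k := by
      refine ⟨((n - 1 - L0) / 4).toNat, ?_⟩
      rw [hL0def, hmod0]
      omega
    unfold naive_sol naive_sol_alt
    rw [if_neg (by simp)]
    simp only [← hn, ← hL0def]
    have hb0 := block_sum m (loU L0) (hiU L0) 0 L0
      (fun c hc1 hc2 => by unfold loU; rw [if_pos (by omega)])
      (fun r hr1 hr2 => by unfold hiU; rw [if_pos (by omega)]; omega)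
    have hpos0 : (iterA (0, 0) m L0).2 = (L0 + 4 * 0, L0 + 4 * 0) := by
      simp only [iterA]
      refine congrArg₂ Prod.mk (by ring) (by ring)
    rw [hpos0]
    rw [loop_sum m L0 (n - 1) k m.length (by omega) _ 0 le_rfl hk]
    have hr1 : L0 + 4 * 0 + 1 = L0 + 1 := by ring
    have hr2 : (n - 1 : Int) + 1 = n := by ring
    rw [hr1, hr2]
    have hb0' : (iterA (0, 0) m L0).1 =
        (List.map (fun c => pvCell m (loU L0 c) c) (PySem.List.pyRange 1 (L0 + 1) 1)).sum
        + (List.map (fun r => pvCell m r (hiU L0 r)) (PySem.List.pyRange 1 (L0 + 1) 1)).sum := by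
      rw [hb0]
      norm_num
    rw [hb0']
    have hsplit : PySem.List.pyRange 1 n 1 =
        PySem.List.pyRange 1 (L0 + 1) 1 ++ PySem.List.pyRange (L0 + 1) n 1 :=
      PySem.List.pyRange_one_append 1 (L0 + 1) n (by omega) (by omega)
    simp only [if_true, hsplit, List.map_append, List.sum_append]
    ring
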